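-- pv_equiv track=rewrite | github.com/InternalCakeEngine/fpga_flapjack | tools/assem/as.py | get_cond
-- ===== SOURCE A (Python) =====
-- def get_cond(cstr):
--     seen_pos = False
--     seen_neg = False
--     f = 0
--     for c in cstr:
--         i = {
--             "a": (0,False),
--             "A": (0,True),
--             "e": (1,False),
--             "E": (1,True),
--             "g": (2,False),
--             "G": (2,True),
--         }.get(c,None)
--         if i:
--             if i[1]:
--                 seen_neg = True
--             else:
--                 seen_pos = True
--             f |= 1<<i[0]
--         else:
--             return None
--     if seen_pos and seen_neg:
--         return None
--     if not ( seen_pos or seen_neg ):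
--         return None
--     if seen_pos:
--         f |= 16
--     return f
-- ===== SOURCE B (Python) =====
-- def get_cond(cstr):
--     # set of letters: the result depends only on WHICH letters occur, not how often/where
--     s = set(cstr)
--     if s and s <= {"a", "e", "g"}:
--         return 16 | ("a" in s) | 2 * ("e" in s) | 4 * ("g" in s)
--     if s and s <= {"A", "E", "G"}:
--         return ("A" in s) | 2 * ("E" in s) | 4 * ("G" in s)
--     return None
-- ===== Notes on version B (the rewrite author's own statement) =====
-- stated objective: alternative
-- what changed: Replaces A's stateful accumulating scan (early return, seen_pos/seen_neg flags, per-char dict lookup OR-ed into f) with a set-of-letters classification: build set(cstr) once, classify it by subset tests against {a,e,g} / {A,E,G}, and read each bit directly off set membership -- no accumulation loop and no early return at all.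
import Mathlib
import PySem

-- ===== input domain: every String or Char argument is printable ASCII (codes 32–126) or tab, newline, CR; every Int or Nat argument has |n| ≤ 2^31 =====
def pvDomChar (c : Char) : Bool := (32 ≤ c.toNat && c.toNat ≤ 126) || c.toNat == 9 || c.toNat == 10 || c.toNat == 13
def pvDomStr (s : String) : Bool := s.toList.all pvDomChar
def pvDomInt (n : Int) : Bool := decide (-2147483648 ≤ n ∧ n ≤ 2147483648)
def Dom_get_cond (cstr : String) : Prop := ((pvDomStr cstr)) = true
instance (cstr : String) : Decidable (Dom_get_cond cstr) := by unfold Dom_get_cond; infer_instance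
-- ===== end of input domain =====

-- B replaces A's accumulating early-return scan with a set-of-letters classification; objective: alternative.

-- ===== PORT A =====
-- the dict literal .get(c, None) of A, as a lookup chain
def tableA (c : Char) : Option (Int × Bool) :=
  if c = 'a' then some (0, false)
  else if c = 'A' then some (0, true)
  else if c = 'e' then some (1, false)
  else if c = 'E' then some (1, true)
  else if c = 'g' then some (2, false)
  else if c = 'G' then some (2, true)
  else none

-- A's for-loop with its early return, then A's trailing checks
def loopA : List Char → Bool → Bool → Int → Option Int
  | [], seen_pos, seen_neg, f =>
      if seen_pos && seen_neg then none
      else if !(seen_pos || seen_neg) then none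
      else some (if seen_pos then PySem.Int.bor f 16 else f)
  | c :: cs, seen_pos, seen_neg, f =>
      match tableA c with
      | none => none
      | some (i, neg) =>
          loopA cs (if neg then seen_pos else true) (if neg then true else seen_neg)
            (PySem.Int.bor f ((1 : Int) <<< i.toNat))  -- i ∈ {0,1,2}: toNat exact

def get_cond (cstr : String) : Option Int :=
  loopA cstr.toList false false 0

-- ===== PORT B =====
-- Source B: s = set(cstr); classify s by subset tests, read bits off membership.
def get_cond_alt (cstr : String) : Option Int :=
  let s : PySem.Set Char := PySem.Set.ofList cstr.toList
  if s ≠ [] ∧ PySem.Set.issubset s (PySem.Set.ofList ['a', 'e', 'g']) = true then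
    some (PySem.Int.bor (PySem.Int.bor (PySem.Int.bor 16 (if 'a' ∈ s then 1 else 0))
          (2 * (if 'e' ∈ s then 1 else 0))) (4 * (if 'g' ∈ s then 1 else 0)))
  else if s ≠ [] ∧ PySem.Set.issubset s (PySem.Set.ofList ['A', 'E', 'G']) = true then
    some (PySem.Int.bor (PySem.Int.bor (if 'A' ∈ s then 1 else 0)
          (2 * (if 'E' ∈ s then 1 else 0))) (4 * (if 'G' ∈ s then 1 else 0)))
  else none

-- ===== PRECONDITION & SPEC =====
def Spec_get_cond (cstr : String) (out : Option Int) : Prop := out = get_cond_alt cstr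
instance (cstr : String) (out : Option Int) : Decidable (Spec_get_cond cstr out) := by unfold Spec_get_cond; infer_instance

-- ===== CLAIM (what is proved, stated in full; the proofs are below) =====
def Claim_equal_get_cond : Prop := ∀ (cstr : String), Dom_get_cond cstr → Spec_get_cond cstr (get_cond cstr)

-- ===== LEMMAS AND PROOFS =====

-- bit contributed by the letter pair (l lowercase, u uppercase) if either occurs in cs
def memBit (cs : List Char) (l u : Char) (b : Int) : Int :=
  if l ∈ cs ∨ u ∈ cs then b else 0

-- characterisation of A's scan from any state with 0 ≤ f < 8
set_option maxHeartbeats 2000000 in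
lemma loopA_char : ∀ (cs : List Char) (sp sn : Bool) (f : Int), 0 ≤ f → f < 8 →
    loopA cs sp sn f =
      if cs.all (fun c => ['a','A','e','E','g','G'].contains c) then
        (if (sp || cs.any (fun c => ['a','e','g'].contains c))
            && (sn || cs.any (fun c => ['A','E','G'].contains c)) then none
         else if !((sp || cs.any (fun c => ['a','e','g'].contains c))
            || (sn || cs.any (fun c => ['A','E','G'].contains c))) then none
         else some ((if sp || cs.any (fun c => ['a','e','g'].contains c) then 16 else 0)
              + (PySem.Int.bor (PySem.Int.bor (PySem.Int.bor f (memBit cs 'a' 'A' 1))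
                  (memBit cs 'e' 'E' 2)) (memBit cs 'g' 'G' 4))))
      else none
  | [], sp, sn, f, h0, h8 => by
      interval_cases f <;> cases sp <;> cases sn <;> simp [loopA, memBit] <;> decide
  | c :: cs, sp, sn, f, h0, h8 => by
      by_cases hv : (['a','A','e','E','g','G'].contains c) = true
      · have hc : c = 'a' ∨ c = 'A' ∨ c = 'e' ∨ c = 'E' ∨ c = 'g' ∨ c = 'G' := by
          simpa using hv
        interval_cases f <;>
        rcases hc with rfl | rfl | rfl | rfl | rfl | rfl <;>
          (simp only [loopA, tableA, Char.reduceEq, reduceIte]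
           rw [loopA_char cs _ _ _ (by decide) (by decide)]
           simp [memBit]
           split_ifs <;> decide)
      · simp at hv
        have ht : tableA c = none := by
          simp [tableA, hv.1, hv.2.1, hv.2.2.1, hv.2.2.2.1, hv.2.2.2.2.1, hv.2.2.2.2.2]
        have hna : ((c :: cs).all (fun c => ['a','A','e','E','g','G'].contains c)) = false := by
          simp [List.all_cons, hv.1, hv.2.1, hv.2.2.1, hv.2.2.2.1, hv.2.2.2.2.1, hv.2.2.2.2.2]
        simp only [loopA, ht, hna]
        simp

lemma ofList_nil_iff (cs : List Char) : PySem.Set.ofList cs = [] ↔ cs = [] := by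
  cases cs with
  | nil => simp [PySem.Set.ofList_nil]
  | cons c cs => simp [PySem.Set.ofList_cons]

-- B's body, stated on the character list
lemma main_eq : ∀ cs : List Char, loopA cs false false 0 =
    (if PySem.Set.ofList cs ≠ [] ∧ PySem.Set.issubset (PySem.Set.ofList cs) (PySem.Set.ofList ['a', 'e', 'g']) = true then
      some (PySem.Int.bor (PySem.Int.bor (PySem.Int.bor 16 (if 'a' ∈ PySem.Set.ofList cs then 1 else 0))
            (2 * (if 'e' ∈ PySem.Set.ofList cs then 1 else 0))) (4 * (if 'g' ∈ PySem.Set.ofList cs then 1 else 0)))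
    else if PySem.Set.ofList cs ≠ [] ∧ PySem.Set.issubset (PySem.Set.ofList cs) (PySem.Set.ofList ['A', 'E', 'G']) = true then
      some (PySem.Int.bor (PySem.Int.bor (if 'A' ∈ PySem.Set.ofList cs then 1 else 0)
            (2 * (if 'E' ∈ PySem.Set.ofList cs then 1 else 0))) (4 * (if 'G' ∈ PySem.Set.ofList cs then 1 else 0)))
    else none) := by
  intro cs
  rw [loopA_char cs false false 0 (by decide) (by decide)]
  by_cases hne : cs = []
  · subst hne; decide
  by_cases hlow : ∀ x ∈ cs, x ∈ (['a', 'e', 'g'] : List Char)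
  · have hL : cs.all (fun c => (['a','A','e','E','g','G'] : List Char).contains c) = true := by
      rw [List.all_eq_true]; intro x hx
      have hm := hlow x hx; simp at hm ⊢; rcases hm with rfl | rfl | rfl <;> decide
    have hP : cs.any (fun c => (['a','e','g'] : List Char).contains c) = true := by
      obtain ⟨x, hx⟩ := List.exists_mem_of_ne_nil cs hne
      rw [List.any_eq_true]
      exact ⟨x, hx, by have hm := hlow x hx; simp at hm ⊢; tauto⟩
    have hN : cs.any (fun c => (['A','E','G'] : List Char).contains c) = false := by
      rw [List.any_eq_false]; intro x hx
      have hm := hlow x hx; simp at hm ⊢; rcases hm with rfl | rfl | rfl <;> decide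
    have hA : ('A' : Char) ∉ cs := fun h => by have := hlow _ h; simp at this
    have hE : ('E' : Char) ∉ cs := fun h => by have := hlow _ h; simp at this
    have hG : ('G' : Char) ∉ cs := fun h => by have := hlow _ h; simp at this
    have hBlow : PySem.Set.ofList cs ≠ [] ∧
        PySem.Set.issubset (PySem.Set.ofList cs) (PySem.Set.ofList ['a', 'e', 'g']) = true := by
      refine ⟨by simp [ofList_nil_iff, hne], ?_⟩
      rw [PySem.Set.issubset_iff]; intro x hx
      rw [PySem.Set.mem_ofList] at hx
      rw [PySem.Set.mem_ofList]
      exact hlow x hx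
    rw [if_pos hBlow, if_pos hL]
    have e1 : memBit cs 'a' 'A' 1 = (if ('a' : Char) ∈ cs then 1 else 0) := by
      unfold memBit
      by_cases h : ('a' : Char) ∈ cs
      · simp [h]
      · simp [h, hA]
    have e2 : memBit cs 'e' 'E' 2 = (if ('e' : Char) ∈ cs then 2 else 0) := by
      unfold memBit
      by_cases h : ('e' : Char) ∈ cs
      · simp [h]
      · simp [h, hE]
    have e3 : memBit cs 'g' 'G' 4 = (if ('g' : Char) ∈ cs then 4 else 0) := by
      unfold memBit
      by_cases h : ('g' : Char) ∈ cs
      · simp [h]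
      · simp [h, hG]
    simp only [Bool.false_or, hP, hN, Bool.and_false, Bool.or_false,
      reduceIte, e1, e2, e3, PySem.Set.mem_ofList]
    split_ifs <;> first | decide | simp_all
  by_cases hup : ∀ x ∈ cs, x ∈ (['A', 'E', 'G'] : List Char)
  · have hL : cs.all (fun c => (['a','A','e','E','g','G'] : List Char).contains c) = true := by
      rw [List.all_eq_true]; intro x hx
      have hm := hup x hx; simp at hm ⊢; rcases hm with rfl | rfl | rfl <;> decide
    have hN : cs.any (fun c => (['A','E','G'] : List Char).contains c) = true := by
      obtain ⟨x, hx⟩ := List.exists_mem_of_ne_nil cs hne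
      rw [List.any_eq_true]
      exact ⟨x, hx, by have hm := hup x hx; simp at hm ⊢; tauto⟩
    have hP : cs.any (fun c => (['a','e','g'] : List Char).contains c) = false := by
      rw [List.any_eq_false]; intro x hx
      have hm := hup x hx; simp at hm ⊢; rcases hm with rfl | rfl | rfl <;> decide
    have ha : ('a' : Char) ∉ cs := fun h => by have := hup _ h; simp at this
    have he : ('e' : Char) ∉ cs := fun h => by have := hup _ h; simp at this
    have hg : ('g' : Char) ∉ cs := fun h => by have := hup _ h; simp at this
    have hBlow : ¬ (PySem.Set.ofList cs ≠ [] ∧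
        PySem.Set.issubset (PySem.Set.ofList cs) (PySem.Set.ofList ['a', 'e', 'g']) = true) := by
      rintro ⟨-, hsub⟩
      obtain ⟨x, hx⟩ := List.exists_mem_of_ne_nil cs hne
      have hm := hup x hx
      have := (PySem.Set.issubset_iff _ _).mp hsub x (by rw [PySem.Set.mem_ofList]; exact hx)
      rw [PySem.Set.mem_ofList] at this
      simp at hm this
      rcases hm with rfl | rfl | rfl <;> simp at this
    have hBup : PySem.Set.ofList cs ≠ [] ∧
        PySem.Set.issubset (PySem.Set.ofList cs) (PySem.Set.ofList ['A', 'E', 'G']) = true := by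
      refine ⟨by simp [ofList_nil_iff, hne], ?_⟩
      rw [PySem.Set.issubset_iff]; intro x hx
      rw [PySem.Set.mem_ofList] at hx
      rw [PySem.Set.mem_ofList]
      exact hup x hx
    rw [if_neg hBlow, if_pos hBup, if_pos hL]
    have e1 : memBit cs 'a' 'A' 1 = (if ('A' : Char) ∈ cs then 1 else 0) := by
      unfold memBit
      by_cases h : ('A' : Char) ∈ cs
      · simp [h]
      · simp [h, ha]
    have e2 : memBit cs 'e' 'E' 2 = (if ('E' : Char) ∈ cs then 2 else 0) := by
      unfold memBit
      by_cases h : ('E' : Char) ∈ cs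
      · simp [h]
      · simp [h, he]
    have e3 : memBit cs 'g' 'G' 4 = (if ('G' : Char) ∈ cs then 4 else 0) := by
      unfold memBit
      by_cases h : ('G' : Char) ∈ cs
      · simp [h]
      · simp [h, hg]
    simp only [Bool.false_or, hP, hN, Bool.false_and, Bool.or_true, Bool.not_true,
      e1, e2, e3, PySem.Set.mem_ofList]
    split_ifs <;> first | decide | simp_all
  · -- mixed or invalid letters: both sides none
    have hBlow : ¬ (PySem.Set.ofList cs ≠ [] ∧
        PySem.Set.issubset (PySem.Set.ofList cs) (PySem.Set.ofList ['a', 'e', 'g']) = true) := by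
      rintro ⟨-, hsub⟩
      apply hlow
      intro x hx
      have := (PySem.Set.issubset_iff _ _).mp hsub x (by rw [PySem.Set.mem_ofList]; exact hx)
      rwa [PySem.Set.mem_ofList] at this
    have hBup : ¬ (PySem.Set.ofList cs ≠ [] ∧
        PySem.Set.issubset (PySem.Set.ofList cs) (PySem.Set.ofList ['A', 'E', 'G']) = true) := by
      rintro ⟨-, hsub⟩
      apply hup
      intro x hx
      have := (PySem.Set.issubset_iff _ _).mp hsub x (by rw [PySem.Set.mem_ofList]; exact hx)
      rwa [PySem.Set.mem_ofList] at this
    rw [if_neg hBlow, if_neg hBup]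
    by_cases hL : cs.all (fun c => (['a','A','e','E','g','G'] : List Char).contains c) = true
    · -- mixed: both any's are true
      obtain ⟨x, hx, hxl⟩ : ∃ x ∈ cs, x ∉ (['a','e','g'] : List Char) := by
        by_contra h; push Not at h; exact hlow h
      obtain ⟨y, hy, hyu⟩ : ∃ y ∈ cs, y ∉ (['A','E','G'] : List Char) := by
        by_contra h; push Not at h; exact hup h
      have hxv := (List.all_eq_true.mp hL) x hx
      have hyv := (List.all_eq_true.mp hL) y hy
      have hN : cs.any (fun c => (['A','E','G'] : List Char).contains c) = true := by
        rw [List.any_eq_true]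
        refine ⟨x, hx, ?_⟩
        simp at hxv hxl ⊢
        rcases hxv with rfl | rfl | rfl | rfl | rfl | rfl <;> simp_all
      have hP : cs.any (fun c => (['a','e','g'] : List Char).contains c) = true := by
        rw [List.any_eq_true]
        refine ⟨y, hy, ?_⟩
        simp at hyv hyu ⊢
        rcases hyv with rfl | rfl | rfl | rfl | rfl | rfl <;> simp_all
      rw [if_pos hL]
      simp only [Bool.false_or, hP, hN, Bool.true_and, reduceIte]
    · rw [if_neg hL]

theorem get_cond_spec : Claim_equal_get_cond := by
  intro cstr _
  exact main_eq cstr.toList
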